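-- pv_equiv track=rewrite | github.com/guige2023/rabai_autoclick | actions/fractions4_action.py | quadratic_voting
-- ===== SOURCE A (Python) =====
-- def quadratic_voting(credits: int, num_issues: int) -> list[int]:
--     """Quadratic voting allocation of credits.
--
--     Args:
--         credits: Total voting credits.
--         num_issues: Number of issues to vote on.
--
--     Returns:
--         List of votes per issue.
--     """
--     votes = [0] * num_issues
--     remaining = credits
--     while remaining > 0:
--         best_idx = 0
--         best_marginal = 0
--         for i in range(num_issues):
--             marginal_cost = 2 * votes[i] + 1
--             if marginal_cost <= remaining and marginal_cost > best_marginal: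
--                 best_marginal = marginal_cost
--                 best_idx = i
--         if best_marginal == 0:
--             break
--         votes[best_idx] += 1
--         remaining -= best_marginal
--     return votes
-- ===== SOURCE B (Python) =====
-- def quadratic_voting(credits: int, num_issues: int) -> list[int]:
--     """Quadratic voting allocation of credits.
--
--     One pass over the issues: A's greedy argmax always saturates the
--     current issue before moving on, so each issue in order simply gets
--     the largest k with k*k <= remaining, and k*k credits are spent.
--     """
--     votes = []
--     remaining = credits
--     for _ in range(num_issues):
--         k = 0
--         while (k + 1) * (k + 1) <= remaining:
--             k += 1
--         votes.append(k)
--         remaining -= k * k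
--     return votes
-- ===== Notes on version B (the rewrite author's own statement) =====
-- stated objective: faster
-- what changed: A repeatedly rescans all issues for the best affordable marginal cost until credits run out; B exploits that this greedy always saturates the current issue before moving on, so it makes a single pass giving each issue in order the largest k with k*k <= remaining and subtracting k*k.
import Mathlib
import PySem

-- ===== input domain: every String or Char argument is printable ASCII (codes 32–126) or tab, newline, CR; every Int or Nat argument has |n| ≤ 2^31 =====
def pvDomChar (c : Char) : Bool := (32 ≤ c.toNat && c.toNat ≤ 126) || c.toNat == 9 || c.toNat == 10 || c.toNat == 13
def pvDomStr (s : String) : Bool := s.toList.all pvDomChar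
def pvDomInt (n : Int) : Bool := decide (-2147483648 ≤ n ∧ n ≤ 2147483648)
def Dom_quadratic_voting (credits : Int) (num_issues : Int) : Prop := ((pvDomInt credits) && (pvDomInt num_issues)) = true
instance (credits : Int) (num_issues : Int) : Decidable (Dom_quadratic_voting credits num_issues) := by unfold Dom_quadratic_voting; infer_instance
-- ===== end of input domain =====

-- B replaces A's repeated whole-list argmax scans by a single pass that gives each
-- issue in order the largest k with k*k ≤ remaining credits (objective: faster).

-- ===== PORT A =====
-- inner `for i in range(num_issues)` scan for the best affordable marginal cost;
-- votes[i] is always in range (0 ≤ i < len(votes)), so the pyGetD default 0 is never used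
def qvStep (remaining : Int) (votes : List Int) (b : Int × Int) (i : Int) : Int × Int :=
  let marginal_cost := 2 * PySem.List.pyGetD votes i 0 + 1
  if marginal_cost ≤ remaining ∧ b.2 < marginal_cost then (i, marginal_cost) else b

def qvScan (votes : List Int) (num_issues : Int) (remaining : Int) : Int × Int :=
  (PySem.List.pyRange 0 num_issues 1).foldl (qvStep remaining votes) (0, 0)

-- the `while remaining > 0` loop; each iteration spends ≥ 1 credit, so
-- fuel = credits.toNat + 1 is enough (a pure totality guard)
def qvLoop (num_issues : Int) : Nat → List Int → Int → List Int
  | 0, votes, _ => votes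
  | fuel + 1, votes, remaining =>
    if 0 < remaining then
      let best := qvScan votes num_issues remaining
      if best.2 = 0 then votes
      else qvLoop num_issues fuel
            (votes.set best.1.toNat (PySem.List.pyGetD votes best.1 0 + 1))
            (remaining - best.2)
    else votes

def quadratic_voting (credits : Int) (num_issues : Int) : List Int :=
  qvLoop num_issues (credits.toNat + 1) (List.replicate num_issues.toNat 0) credits

-- ===== PORT B =====
-- the `while (k+1)*(k+1) <= remaining: k += 1` count-up; k rises at most
-- remaining.toNat times, so that fuel is enough (a pure totality guard)
def isqrtUp : Nat → Int → Int → Int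
  | 0, _, k => k
  | fuel + 1, n, k => if (k + 1) * (k + 1) ≤ n then isqrtUp fuel n (k + 1) else k

def quadratic_voting_alt (credits : Int) (num_issues : Int) : List Int :=
  ((PySem.List.pyRange 0 num_issues 1).foldl
    (fun (st : List Int × Int) _ =>
      let k := isqrtUp st.2.toNat st.2 0
      (st.1 ++ [k], st.2 - k * k)) ([], credits)).1

-- ===== PRECONDITION & SPEC =====
def Spec_quadratic_voting (credits : Int) (num_issues : Int) (out : List Int) : Prop := out = quadratic_voting_alt credits num_issues
instance (credits : Int) (num_issues : Int) (out : List Int) : Decidable (Spec_quadratic_voting credits num_issues out) := by unfold Spec_quadratic_voting; infer_instance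

-- ===== CLAIM (what is proved, stated in full; the proofs are below) =====
def Claim_equal_quadratic_voting : Prop := ∀ (credits : Int) (num_issues : Int), Dom_quadratic_voting credits num_issues → Spec_quadratic_voting credits num_issues (quadratic_voting credits num_issues)

-- ===== LEMMAS AND PROOFS =====

-- common mathematical description: each issue in order receives ⌊√remaining⌋ votes
def sqI (r : Int) : Int := (Nat.sqrt r.toNat : Int)

def specGo : Nat → Int → List Int
  | 0, _ => []
  | m + 1, r => sqI r :: specGo m (r - sqI r * sqI r)

-- final vote count of the current issue, starting from v votes with r credits left
def finT (v r : Int) : Int := max v (Nat.sqrt (r + v * v).toNat : Int)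

lemma foldl_id_of {α β : Type} (f : β → α → β) (b : β) (l : List α)
    (h : ∀ a ∈ l, f b a = b) : l.foldl f b = b := by
  induction l with
  | nil => rfl
  | cons x xs ih => simp only [List.foldl_cons, h x (by simp)]; exact ih fun a ha => h a (by simp [ha])

lemma specGo_nonpos (m : Nat) (r : Int) (hr : r ≤ 0) : specGo m r = List.replicate m 0 := by
  induction m generalizing r with
  | zero => rfl
  | succ m ih =>
    have h0 : sqI r = 0 := by
      simp [sqI, Int.toNat_of_nonpos hr]
    simp [specGo, h0, List.replicate_succ, ih r hr]

lemma le_sqrt_toNat (x v : Int) (hv : 0 ≤ v) (h : v * v ≤ x) :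
    v ≤ (Nat.sqrt x.toNat : Int) := by
  have hx : 0 ≤ x := le_trans (mul_nonneg hv hv) h
  have hv' : (v.toNat : Int) = v := Int.toNat_of_nonneg hv
  have hx' : (x.toNat : Int) = x := Int.toNat_of_nonneg hx
  have h1 : v.toNat ^ 2 ≤ x.toNat := by
    have h1' : ((v.toNat ^ 2 : Nat) : Int) ≤ ((x.toNat : Nat) : Int) := by
      push_cast [hv', hx']
      nlinarith
    exact_mod_cast h1'
  have h2 : v.toNat ≤ Nat.sqrt x.toNat := Nat.le_sqrt'.mpr h1
  omega

lemma sqrt_toNat_le (x v : Int) (hv : 0 ≤ v) (h : x < (v + 1) * (v + 1)) :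
    (Nat.sqrt x.toNat : Int) ≤ v := by
  by_contra hc
  have h2 : v + 1 ≤ (Nat.sqrt x.toNat : Int) := by omega
  have h3 : (v + 1) * (v + 1) ≤ (Nat.sqrt x.toNat : Int) * (Nat.sqrt x.toNat : Int) :=
    mul_le_mul h2 h2 (by omega) (by positivity)
  have h4 : ((Nat.sqrt x.toNat ^ 2 : Nat) : Int) ≤ ((x.toNat : Nat) : Int) := by
    exact_mod_cast Nat.sqrt_le' x.toNat
  push_cast at h4
  by_cases hx : 0 ≤ x
  · rw [Int.toNat_of_nonneg hx] at h4
    nlinarith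
  · have hx0 : x.toNat = 0 := by omega
    rw [hx0, Nat.sqrt_zero] at h2
    push_cast at h2
    omega

lemma finT_of_lt (v r : Int) (hv : 0 ≤ v) (h : r < 2 * v + 1) : finT v r = v := by
  have := sqrt_toNat_le (r + v * v) v hv (by nlinarith)
  unfold finT
  omega

lemma finT_eq_sqI (r : Int) (hr : 0 < r) : finT 0 r = sqI r ∧ finT 1 (r - 1) = sqI r := by
  have h0 : (0 : Int) ≤ (Nat.sqrt r.toNat : Int) := by positivity
  have h1 : (1 : Int) ≤ (Nat.sqrt r.toNat : Int) := le_sqrt_toNat r 1 (by omega) (by omega)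
  constructor
  · unfold finT sqI
    rw [show r + 0 * 0 = r from by ring]
    omega
  · unfold finT sqI
    rw [show r - 1 + 1 * 1 = r from by ring]
    omega

lemma finT_step (v r : Int) (hv : 0 ≤ v) (h : 2 * v + 1 ≤ r) :
    finT (v + 1) (r - (2 * v + 1)) = finT v r := by
  have harg : r - (2 * v + 1) + (v + 1) * (v + 1) = r + v * v := by ring
  have hs : v + 1 ≤ (Nat.sqrt (r + v * v).toNat : Int) := by
    apply le_sqrt_toNat _ _ (by omega)
    nlinarith
  unfold finT
  rw [harg]
  omega

lemma isqrtUp_eq (fuel : Nat) (n k : Int) (hk : 0 ≤ k) (hkn : k * k ≤ n)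
    (hf : Nat.sqrt n.toNat ≤ k.toNat + fuel) : isqrtUp fuel n k = sqI n := by
  induction fuel generalizing k with
  | zero =>
    have hle : k ≤ sqI n := le_sqrt_toNat n k hk hkn
    unfold sqI at *
    simp only [isqrtUp]
    omega
  | succ fuel ih =>
    simp only [isqrtUp]
    split
    · rename_i hcond
      exact ih (k + 1) (by omega) hcond (by omega)
    · rename_i hcond
      have h1 : (Nat.sqrt n.toNat : Int) ≤ k := sqrt_toNat_le n k hk (by omega)
      have h2 : k ≤ sqI n := le_sqrt_toNat n k hk hkn
      unfold sqI at *
      omega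

lemma isqrtUp_top (n : Int) : isqrtUp n.toNat n 0 = sqI n := by
  by_cases hn : 0 ≤ n
  · apply isqrtUp_eq n.toNat n 0 le_rfl (by simpa using hn)
    simpa using Nat.sqrt_le_self n.toNat
  · have h0 : n.toNat = 0 := by omega
    simp [h0, isqrtUp, sqI, Nat.sqrt]

lemma alt_fold (l : List Int) (acc : List Int) (r : Int) :
    (l.foldl (fun (st : List Int × Int) _ =>
      let k := isqrtUp st.2.toNat st.2 0
      (st.1 ++ [k], st.2 - k * k)) (acc, r)).1 = acc ++ specGo l.length r := by
  induction l generalizing acc r with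
  | nil => simp [specGo]
  | cons x xs ih =>
    rw [List.foldl_cons]
    rw [show (let k := isqrtUp (acc, r).2.toNat (acc, r).2 0
        ((acc, r).1 ++ [k], (acc, r).2 - k * k)) = (acc ++ [sqI r], r - sqI r * sqI r) from by
      simp [isqrtUp_top], ih]
    simp [specGo]

-- characterisation of one inner scan on a state sat ++ v :: zs
lemma getD_mid (sat : List Int) (v : Int) (zs : List Int) :
    PySem.List.pyGetD (sat ++ v :: zs) (sat.length : Int) 0 = v := by
  rw [PySem.List.pyGetD_eq_getElem _ 0 (by positivity) (by simp)]
  rw [List.getElem_append_right (by simp)]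
  simp

lemma getD_left (sat : List Int) (v : Int) (zs : List Int) (i : Int)
    (h0 : 0 ≤ i) (h1 : i < (sat.length : Int)) :
    PySem.List.pyGetD (sat ++ v :: zs) i 0 ∈ sat := by
  rw [PySem.List.pyGetD_eq_getElem _ 0 h0 (by try simp; all_goals omega)]
  rw [List.getElem_append_left (by omega)]
  exact List.getElem_mem _

lemma getD_right (sat : List Int) (v : Int) (zs : List Int) (i : Int)
    (hzs : ∀ z ∈ zs, z = 0)
    (h0 : (sat.length : Int) + 1 ≤ i) (h1 : i < (sat.length : Int) + 1 + zs.length) :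
    PySem.List.pyGetD (sat ++ v :: zs) i 0 = 0 := by
  rw [show sat ++ v :: zs = (sat ++ [v]) ++ zs from by simp]
  rw [PySem.List.pyGetD_eq_getElem _ 0 (by omega) (by try simp; all_goals omega)]
  rw [List.getElem_append_right (by try simp; all_goals omega)]
  exact hzs _ (List.getElem_mem _)

lemma qvScan_eq (sat : List Int) (v : Int) (zs : List Int) (r : Int)
    (hsat : ∀ s ∈ sat, r < 2 * s + 1) (hv : 0 ≤ v) (hzs : ∀ z ∈ zs, z = 0) (hr : 0 < r) :
    qvScan (sat ++ v :: zs) ((sat.length : Int) + 1 + zs.length) r =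
      if 2 * v + 1 ≤ r then ((sat.length : Int), 2 * v + 1)
      else if zs = [] then (0, 0)
      else ((sat.length : Int) + 1, 1) := by
  have hstep : ∀ (p q i : Int), qvStep r (sat ++ v :: zs) (p, q) i =
      if 2 * PySem.List.pyGetD (sat ++ v :: zs) i 0 + 1 ≤ r ∧
          q < 2 * PySem.List.pyGetD (sat ++ v :: zs) i 0 + 1
      then (i, 2 * PySem.List.pyGetD (sat ++ v :: zs) i 0 + 1) else (p, q) :=
    fun _ _ _ => rfl
  have htail : ∀ (a p q : Int), (sat.length : Int) + 1 ≤ a → 1 ≤ q →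
      (PySem.List.pyRange a ((sat.length : Int) + 1 + (zs.length : Int)) 1).foldl
        (qvStep r (sat ++ v :: zs)) (p, q) = (p, q) := by
    intro a p q ha hq
    apply foldl_id_of
    intro i hi
    rw [PySem.List.mem_pyRange_one] at hi
    rw [hstep, getD_right sat v zs i hzs (by omega) (by omega), if_neg (by omega)]
  have hpre : (PySem.List.pyRange 0 (sat.length : Int) 1).foldl
      (qvStep r (sat ++ v :: zs)) (0, 0) = (0, 0) := by
    apply foldl_id_of
    intro i hi
    rw [PySem.List.mem_pyRange_one] at hi
    have h0 := hsat _ (getD_left sat v zs i hi.1 hi.2)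
    rw [hstep, if_neg (by omega)]
  unfold qvScan
  rw [PySem.List.pyRange_one_append 0 (sat.length : Int)
        ((sat.length : Int) + 1 + (zs.length : Int)) (by positivity) (by omega),
      List.foldl_append, hpre,
      PySem.List.pyRange_one_cons
        (show (sat.length : Int) < (sat.length : Int) + 1 + (zs.length : Int) by omega),
      List.foldl_cons, hstep, getD_mid]
  by_cases hcase : 2 * v + 1 ≤ r
  · rw [if_pos ⟨hcase, by omega⟩, if_pos hcase]
    exact htail _ _ _ (by omega) (by omega)
  · rw [if_neg (by omega), if_neg hcase]
    cases zs with
    | nil =>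
      rw [PySem.List.pyRange_one_eq_nil (by simp)]
      simp
    | cons z zs' =>
      rw [PySem.List.pyRange_one_cons
            (show (sat.length : Int) + 1 < (sat.length : Int) + 1 + (((z :: zs').length : Nat) : Int)
              by simp),
          List.foldl_cons, hstep,
          getD_right sat v (z :: zs') ((sat.length : Int) + 1) hzs (by omega)
            (by simp),
          if_pos (by omega)]
      rw [htail _ _ _ (by omega) (by omega)]
      simp

lemma qvLoop_eq (fuel : Nat) : ∀ (sat : List Int) (v : Int) (zs : List Int) (r : Int),
    (∀ s ∈ sat, r < 2 * s + 1) → 0 ≤ v → (∀ z ∈ zs, z = 0) → r.toNat < fuel →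
    qvLoop ((sat.length : Int) + 1 + zs.length) fuel (sat ++ v :: zs) r =
      sat ++ finT v r :: specGo zs.length (r - (finT v r * finT v r - v * v)) := by
  induction fuel with
  | zero => intro sat v zs r _ _ _ hf; omega
  | succ fuel ih =>
    intro sat v zs r hsat hv hzs hf
    by_cases hr : 0 < r
    case neg =>
      simp only [qvLoop, if_neg hr]
      rw [finT_of_lt v r hv (by omega), show r - (v * v - v * v) = r from by ring,
        specGo_nonpos _ _ (by omega)]
      rw [show List.replicate zs.length (0 : Int) = zs from (List.eq_replicate_of_mem hzs).symm]
    case pos =>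
      simp only [qvLoop, if_pos hr]
      rw [qvScan_eq sat v zs r hsat hv hzs hr]
      by_cases hcase : 2 * v + 1 ≤ r
      · rw [if_pos hcase]
        rw [if_neg (show ¬(((sat.length : Int), 2 * v + 1).2 = 0) from by exact (by omega : ¬(2 * v + 1 = 0)))]
        show qvLoop ((sat.length : Int) + 1 + zs.length) fuel
            ((sat ++ v :: zs).set ((sat.length : Int)).toNat
              (PySem.List.pyGetD (sat ++ v :: zs) (sat.length : Int) 0 + 1))
            (r - (2 * v + 1)) = _
        rw [getD_mid, Int.toNat_natCast,
          show (sat ++ v :: zs).set sat.length (v + 1) = sat ++ (v + 1) :: zs from by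
            rw [List.set_append]; simp]
        rw [ih sat (v + 1) zs (r - (2 * v + 1))
          (fun s hs => by have := hsat s hs; omega) (by omega) hzs (by omega)]
        rw [finT_step v r hv hcase]
        rw [show r - (2 * v + 1) - (finT v r * finT v r - (v + 1) * (v + 1)) =
          r - (finT v r * finT v r - v * v) from by ring]
      · rw [if_neg hcase]
        cases zs with
        | nil =>
          rw [if_pos (rfl : ([] : List Int) = [])]
          rw [if_pos (show (((0 : Int), (0 : Int)).2 = 0) from rfl)]
          rw [finT_of_lt v r hv (by omega)]
          simp [specGo]
        | cons z zs' =>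
          rw [if_neg (List.cons_ne_nil z zs')]
          rw [if_neg (show ¬((((sat.length : Int) + 1, (1 : Int)).2 = 0)) from by
            exact (by omega : ¬((1 : Int) = 0)))]
          show qvLoop ((sat.length : Int) + 1 + ((z :: zs').length : Int)) fuel
              ((sat ++ v :: z :: zs').set ((sat.length : Int) + 1).toNat
                (PySem.List.pyGetD (sat ++ v :: z :: zs') ((sat.length : Int) + 1) 0 + 1))
              (r - 1) = _
          rw [getD_right sat v (z :: zs') ((sat.length : Int) + 1) hzs (by omega)
                (by simp),
            show ((sat.length : Int) + 1).toNat = sat.length + 1 from by omega,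
            show (sat ++ v :: z :: zs').set (sat.length + 1) (0 + 1) = (sat ++ [v]) ++ (0 + 1) :: zs' from by
              rw [List.set_append]; simp,
            show (sat.length : Int) + 1 + ((z :: zs').length : Int) =
              (((sat ++ [v]).length : Nat) : Int) + 1 + ((zs'.length : Nat) : Int) from by
              try simp; all_goals omega]
          rw [ih (sat ++ [v]) (0 + 1) zs' (r - 1)
            (fun s hs => by
              rcases List.mem_append.mp hs with h | h
              · have := hsat s h; omega
              · simp at h; omega)
            (by omega) (fun z hz => hzs z (by simp [hz])) (by omega)]
          rw [show (0 : Int) + 1 = 1 from by ring, (finT_eq_sqI r hr).2,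
            finT_of_lt v r hv (by omega)]
          rw [show r - 1 - (sqI r * sqI r - 1 * 1) = r - sqI r * sqI r from by ring,
            show r - (v * v - v * v) = r from by ring]
          simp [specGo]

-- ===== VERDICT (by name: the statement is the Claim_ definition above) =====
lemma finT_zero (c : Int) : finT 0 c = sqI c := by
  by_cases hc : 0 < c
  · exact (finT_eq_sqI c hc).1
  · rw [finT_of_lt 0 c le_rfl (by omega)]
    unfold sqI
    rw [Int.toNat_of_nonpos (by omega)]
    simp

theorem quadratic_voting_spec : Claim_equal_quadratic_voting := by
  intro credits num_issues _
  unfold Spec_quadratic_voting quadratic_voting quadratic_voting_alt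
  rw [alt_fold, PySem.List.length_pyRange_one]
  by_cases hn : 0 < num_issues
  · rw [show num_issues - 0 = num_issues from by ring]
    obtain ⟨m, hm⟩ : ∃ m, num_issues.toNat = m + 1 := ⟨num_issues.toNat - 1, by omega⟩
    rw [hm]
    have hmain := qvLoop_eq (credits.toNat + 1) [] 0 (List.replicate m 0) credits
      (by simp) le_rfl (fun z hz => List.eq_of_mem_replicate hz) (by omega)
    rw [show List.replicate (m + 1) (0 : Int) = [] ++ (0 : Int) :: List.replicate m 0 from by
        simp [List.replicate_succ],
      show num_issues = ((([] : List Int).length : Nat) : Int) + 1 +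
          (((List.replicate m (0 : Int)).length : Nat) : Int) from by
        try simp; all_goals omega,
      hmain]
    rw [finT_zero, show credits - (sqI credits * sqI credits - 0 * 0) =
        credits - sqI credits * sqI credits from by ring]
    simp [specGo]
  · have h0 : num_issues.toNat = 0 := by omega
    have hrange : PySem.List.pyRange 0 num_issues 1 = [] :=
      PySem.List.pyRange_one_eq_nil (by omega)
    rw [show num_issues - 0 = num_issues from by ring, h0]
    simp [qvLoop, qvScan, hrange, specGo]
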